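-- pv_equiv track=rewrite | github.com/yongjunan111/telegram-cto-orchestrator | lib/gc_audit.py | _compute_coherence
-- ===== SOURCE A (Python) =====
-- def _compute_coherence(results, handoff_parse_errors) -> str:
--     """Room-level verdict derived from Tier 1 session verdicts.
--
--     - `unknown`: any parse errors prevent a definitive call.
--     - `some-at-risk`: any session is at-risk.
--     - `coherent`: at least one bound session and all bound sessions are promoted.
--     - `neutral`: no bound sessions (only unbound or none).
--     """
--     if handoff_parse_errors:
--         return "unknown"
--     if any(r["audit_verdict"] == "parse-error" for r in results):
--         return "unknown"
--     if any(r["audit_verdict"] == "at-risk" for r in results):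
--         return "some-at-risk"
--     bound = [
--         r for r in results
--         if r["audit_verdict"] not in ("unbound", "parse-error")
--     ]
--     if bound and all(r["audit_verdict"] == "promoted" for r in bound):
--         return "coherent"
--     return "neutral"
-- ===== SOURCE B (Python) =====
-- def _compute_coherence(results, handoff_parse_errors) -> str:
--     if handoff_parse_errors:
--         return "unknown"
--     has_at_risk = False
--     has_bound = False
--     all_promoted = True
--     for r in results:
--         v = r["audit_verdict"]
--         if v == "parse-error":
--             return "unknown"
--         if v == "at-risk":
--             has_at_risk = True
--         if v != "unbound":
--             has_bound = True
--             all_promoted = all_promoted and v == "promoted"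
--     if has_at_risk:
--         return "some-at-risk"
--     if has_bound and all_promoted:
--         return "coherent"
--     return "neutral"
-- ===== Notes on version B (the rewrite author's own statement) =====
-- stated objective: alternative
-- what changed: Replaces A's four separate scans (two any-scans, a filter, an all-scan) with a single pass that returns 'unknown' on the first parse-error and otherwise maintains has_at_risk/has_bound/all_promoted flags, deciding the verdict after the loop.
import Mathlib
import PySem

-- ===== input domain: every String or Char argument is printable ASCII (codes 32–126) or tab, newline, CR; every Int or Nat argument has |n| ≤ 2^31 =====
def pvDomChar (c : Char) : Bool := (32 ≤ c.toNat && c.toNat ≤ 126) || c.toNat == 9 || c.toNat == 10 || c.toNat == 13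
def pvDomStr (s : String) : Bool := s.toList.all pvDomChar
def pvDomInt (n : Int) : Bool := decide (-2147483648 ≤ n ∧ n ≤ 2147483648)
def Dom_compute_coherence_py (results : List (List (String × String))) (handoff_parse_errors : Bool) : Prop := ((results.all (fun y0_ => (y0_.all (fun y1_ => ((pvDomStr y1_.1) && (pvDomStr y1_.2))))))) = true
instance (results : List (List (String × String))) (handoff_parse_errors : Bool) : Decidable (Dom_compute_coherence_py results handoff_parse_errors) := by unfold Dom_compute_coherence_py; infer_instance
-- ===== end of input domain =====

-- One honest line: B replaces A's four scans with a single pass keeping three flags; same O(n), different decomposition.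
-- Missing 'audit_verdict' keys are modelled via getD ""; Pre_ excludes exactly the inputs where the Python raises KeyError.

-- ===== PORT A =====
-- r["audit_verdict"]: under Pre_ the key is present wherever A reads it; getD "" is exact there.
def pvVerdict (r : List (String × String)) : String := PySem.Dict.getD (PySem.Dict.mk r) "audit_verdict" ""

def compute_coherence_py (results : List (List (String × String))) (handoff_parse_errors : Bool) : String :=
  if handoff_parse_errors then "unknown"
  else if results.any (fun r => pvVerdict r == "parse-error") then "unknown"
  else if results.any (fun r => pvVerdict r == "at-risk") then "some-at-risk"
  else
    let bound := results.filter (fun r => !(pvVerdict r == "unbound" || pvVerdict r == "parse-error"))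
    if (!bound.isEmpty) && bound.all (fun r => pvVerdict r == "promoted") then "coherent"
    else "neutral"

-- ===== PORT B =====
def pvLoopB (results : List (List (String × String))) (hasAtRisk hasBound allPromoted : Bool) : String :=
  match results with
  | [] =>
      if hasAtRisk then "some-at-risk"
      else if hasBound && allPromoted then "coherent"
      else "neutral"
  | r :: rest =>
      let v := pvVerdict r
      if v == "parse-error" then "unknown"
      else
        pvLoopB rest (hasAtRisk || v == "at-risk") (hasBound || v != "unbound")
          (if v != "unbound" then allPromoted && v == "promoted" else allPromoted)

def compute_coherence_py_alt (results : List (List (String × String))) (handoff_parse_errors : Bool) : String :=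
  if handoff_parse_errors then "unknown"
  else pvLoopB results false false true

-- ===== PRECONDITION & SPEC =====
-- Pre_ excludes exactly the inputs where the Python A raises KeyError (a dict without 'audit_verdict'
-- reached before any parse-error verdict); B raises there too.
def Pre_compute_coherence_py (results : List (List (String × String))) (handoff_parse_errors : Bool) : Prop :=
  handoff_parse_errors = true ∨
    ∀ i < results.length,
      (∀ j < i, PySem.Dict.get? (PySem.Dict.mk (results.getD j [])) "audit_verdict" ≠ some "parse-error") →
      (PySem.Dict.get? (PySem.Dict.mk (results.getD i [])) "audit_verdict").isSome = true
instance (results : List (List (String × String))) (handoff_parse_errors : Bool) : Decidable (Pre_compute_coherence_py results handoff_parse_errors) := by unfold Pre_compute_coherence_py; infer_instance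

def pvWitness_compute_coherence_py : (List (List (String × String))) × Bool :=
  ([[("audit_verdict", "promoted")], [("audit_verdict", "unbound")]], false)

def Spec_compute_coherence_py (results : List (List (String × String))) (handoff_parse_errors : Bool) (out : String) : Prop := out = compute_coherence_py_alt results handoff_parse_errors
instance (results : List (List (String × String))) (handoff_parse_errors : Bool) (out : String) : Decidable (Spec_compute_coherence_py results handoff_parse_errors out) := by unfold Spec_compute_coherence_py; infer_instance

-- ===== CLAIM (what is proved, stated in full; the proofs are below) =====
def Claim_equal_compute_coherence_py : Prop := ∀ (results : List (List (String × String))) (handoff_parse_errors : Bool), Dom_compute_coherence_py results handoff_parse_errors → Pre_compute_coherence_py results handoff_parse_errors → Spec_compute_coherence_py results handoff_parse_errors (compute_coherence_py results handoff_parse_errors)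

-- ===== LEMMAS AND PROOFS =====

-- Invariant: the one-pass loop equals the multi-scan reference with the accumulators folded in.
theorem pvLoopB_spec (results : List (List (String × String))) (a b p : Bool) :
    pvLoopB results a b p =
      if results.any (fun r => pvVerdict r == "parse-error") then "unknown"
      else if a || results.any (fun r => pvVerdict r == "at-risk") then "some-at-risk"
      else if (b || results.any (fun r => pvVerdict r != "unbound"))
            && (p && results.all (fun r => pvVerdict r == "unbound" || pvVerdict r == "promoted")) then "coherent"
      else "neutral" := by
  induction results generalizing a b p with
  | nil => simp [pvLoopB]
  | cons r rest ih =>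
    by_cases hpe : pvVerdict r = "parse-error"
    · simp [pvLoopB, hpe]
    · simp only [pvLoopB, List.any_cons, List.all_cons]
      rw [if_neg (by simp [hpe]), ih]
      by_cases hv : pvVerdict r = "unbound" <;>
        simp [hpe, hv, Bool.or_assoc, Bool.and_assoc, Bool.and_left_comm]

-- In the absence of parse-errors, A's filter of bound sessions is the filter on v ≠ "unbound".
theorem pvFilterNe (results : List (List (String × String)))
    (hne : results.any (fun r => pvVerdict r == "parse-error") = false) :
    (!(results.filter (fun r => !(pvVerdict r == "unbound" || pvVerdict r == "parse-error"))).isEmpty)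
      = results.any (fun r => pvVerdict r != "unbound") := by
  induction results with
  | nil => simp
  | cons r rest ih =>
    simp only [List.any_cons, Bool.or_eq_false_iff] at hne
    obtain ⟨h1, h2⟩ := hne
    have hpe : ¬ pvVerdict r = "parse-error" := by simpa using h1
    by_cases hv : pvVerdict r = "unbound"
    · simpa [List.filter_cons, hv, hpe] using ih h2
    · simp [hv, hpe]

theorem pvAllFilter (results : List (List (String × String)))
    (hne : results.any (fun r => pvVerdict r == "parse-error") = false) :
    (results.filter (fun r => !(pvVerdict r == "unbound" || pvVerdict r == "parse-error"))).all
        (fun r => pvVerdict r == "promoted")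
      = results.all (fun r => pvVerdict r == "unbound" || pvVerdict r == "promoted") := by
  induction results with
  | nil => simp
  | cons r rest ih =>
    simp only [List.any_cons, Bool.or_eq_false_iff] at hne
    obtain ⟨h1, h2⟩ := hne
    have hpe : ¬ pvVerdict r = "parse-error" := by simpa using h1
    by_cases hv : pvVerdict r = "unbound"
    · simpa [List.filter_cons, hv, hpe] using ih h2
    · have hcond : (!(pvVerdict r == "unbound" || pvVerdict r == "parse-error")) = true := by
        simp [hv, hpe]
      have hstep : List.filter (fun r => !(pvVerdict r == "unbound" || pvVerdict r == "parse-error")) (r :: rest)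
          = r :: List.filter (fun r => !(pvVerdict r == "unbound" || pvVerdict r == "parse-error")) rest := by
        simp [hv, hpe]
      rw [hstep, List.all_cons, List.all_cons, ih h2]
      have hb : (pvVerdict r == "unbound") = false := by simp [hv]
      rw [hb, Bool.false_or]

-- A's bound test equals the scan form used in pvLoopB_spec (when no parse-error occurs).
theorem pvBound_eq (results : List (List (String × String)))
    (hne : results.any (fun r => pvVerdict r == "parse-error") = false) :
    ((!(results.filter (fun r => !(pvVerdict r == "unbound" || pvVerdict r == "parse-error"))).isEmpty)
      && (results.filter (fun r => !(pvVerdict r == "unbound" || pvVerdict r == "parse-error"))).all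
            (fun r => pvVerdict r == "promoted"))
    = ((results.any (fun r => pvVerdict r != "unbound"))
      && results.all (fun r => pvVerdict r == "unbound" || pvVerdict r == "promoted")) := by
  rw [pvFilterNe results hne, pvAllFilter results hne]

-- ===== VERDICT (by name: the statement is the Claim_ definition above) =====
theorem compute_coherence_py_spec : Claim_equal_compute_coherence_py := by
  intro results h _ _
  unfold Spec_compute_coherence_py compute_coherence_py compute_coherence_py_alt
  by_cases hh : h = true
  · simp [hh]
  · simp only [hh, Bool.false_eq_true, if_false]
    rw [pvLoopB_spec]
    by_cases hpe : results.any (fun r => pvVerdict r == "parse-error") = true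
    · simp [hpe]
    · have hpe' : results.any (fun r => pvVerdict r == "parse-error") = false := by
        simpa using hpe
      by_cases har : results.any (fun r => pvVerdict r == "at-risk") = true
      · simp [hpe', har]
      · simp only [hpe', Bool.false_eq_true, if_false, har, Bool.false_or]
        rw [pvBound_eq results hpe']
        simp
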